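-- pv_equiv track=rewrite | github.com/XiaoCoding2/codingClass | usaco_bronze_2018.py | mix_milk
-- ===== SOURCE A (Python) =====
-- def pour_milk(amount1, limit2, amount2):
--     if amount1 + amount2 <= limit2:
--         amount1_new = 0
--         amount2_new = amount1 + amount2
--     else:
--         amount2_new = limit2
--         amount1_new = (amount1+amount2)-limit2
--     return amount1_new, amount2_new
--
-- def mix_milk(c1, m1, c2, m2, c3, m3):
--     count = 1
--     for x in range(0, 100):
--         if count > 3:
--             count = 1
--         #main run code
--         if count == 1:
--             m1, m2 = pour_milk(m1, c2, m2)
--             count += 1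
--
--         elif count == 2:
--             m2, m3 = pour_milk(m2, c3, m3)
--             count += 1
--
--         elif count == 3:
--             m3, m1 = pour_milk(m3, c1, m1)
--             count += 1
--
--     return m1, m2, m3
-- ===== SOURCE B (Python) =====
-- def mix_milk(c1, m1, c2, m2, c3, m3):
--     # Cycle detection over full 3-pour rounds: the 100 pours are 33 full rounds
--     # (1->2, 2->3, 3->1) plus one final 1->2 pour.  Round states are recorded;
--     # once a state repeats, the remaining rounds are skipped by a modular jump.
--     def pour(src, cap, dst):
--         t = src + dst
--         if t <= cap:
--             return 0, t
--         return t - cap, cap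
--
--     def full_round(s):
--         a, b, c = s
--         a, b = pour(a, c2, b)
--         b, c = pour(b, c3, c)
--         c, a = pour(c, c1, a)
--         return (a, b, c)
--
--     state = (m1, m2, m3)
--     history = []
--     r = 0
--     while r < 33:
--         if state in history:
--             i = history.index(state)
--             rem = (33 - r) % (r - i)
--             for _ in range(rem):
--                 state = full_round(state)
--             r = 33
--         else:
--             history.append(state)
--             state = full_round(state)
--             r += 1
--     a, b, c = state
--     a, b = pour(a, c2, b)
--     return (a, b, c)
-- ===== Notes on version B (the rewrite author's own statement) =====
-- stated objective: alternative
-- what changed: Instead of the flat 100-step count-dispatch simulation, B groups the pours into full 3-pour rounds, records each round state, and on the first repeated state computes the cycle length and jumps the remaining rounds with a modular shortcut ((33-r) % period), finishing with the single leftover 1->2 pour.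
import Mathlib
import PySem

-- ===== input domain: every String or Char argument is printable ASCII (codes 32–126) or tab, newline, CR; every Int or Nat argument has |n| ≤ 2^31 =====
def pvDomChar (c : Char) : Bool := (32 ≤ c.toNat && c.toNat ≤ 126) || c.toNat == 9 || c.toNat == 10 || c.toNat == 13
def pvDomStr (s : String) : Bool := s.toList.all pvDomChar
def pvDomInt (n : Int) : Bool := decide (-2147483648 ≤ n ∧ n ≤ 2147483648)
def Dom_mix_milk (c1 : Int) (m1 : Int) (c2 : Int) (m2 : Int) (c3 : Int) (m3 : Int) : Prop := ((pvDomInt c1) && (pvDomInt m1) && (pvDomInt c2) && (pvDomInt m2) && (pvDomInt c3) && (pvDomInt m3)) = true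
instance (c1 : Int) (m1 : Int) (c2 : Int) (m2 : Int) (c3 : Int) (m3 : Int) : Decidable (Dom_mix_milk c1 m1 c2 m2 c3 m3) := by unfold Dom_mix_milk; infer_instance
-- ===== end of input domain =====

-- B replaces A's flat 100-step count-dispatch simulation by cycle detection over
-- full 3-pour rounds with a modular jump past the repeated cycle, then the one
-- leftover 1->2 pour; objective: alternative (same exact result).

-- ===== PORT A =====
def pour_milk (amount1 : Int) (limit2 : Int) (amount2 : Int) : Int × Int :=
  if amount1 + amount2 ≤ limit2 then
    (0, amount1 + amount2)
  else
    ((amount1 + amount2) - limit2, limit2)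

-- loop body of A's for-loop, as a named helper (state = (count, m1, m2, m3))
def mixStepA (c1 : Int) (c2 : Int) (c3 : Int) (st : Int × Int × Int × Int) : Int × Int × Int × Int :=
  let (count, m1, m2, m3) := st
  let count := if count > 3 then 1 else count
  if count = 1 then
    let (m1', m2') := pour_milk m1 c2 m2
    (count + 1, m1', m2', m3)
  else if count = 2 then
    let (m2', m3') := pour_milk m2 c3 m3
    (count + 1, m1, m2', m3')
  else if count = 3 then
    let (m3', m1') := pour_milk m3 c1 m1
    (count + 1, m1', m2, m3')
  else
    (count, m1, m2, m3)

def mix_milk (c1 : Int) (m1 : Int) (c2 : Int) (m2 : Int) (c3 : Int) (m3 : Int) : Int × Int × Int :=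
  let fin := (PySem.List.pyRange 0 100 1).foldl (fun st _x => mixStepA c1 c2 c3 st) (1, m1, m2, m3)
  (fin.2.1, fin.2.2.1, fin.2.2.2)

-- ===== PORT B =====
-- Source B's local helper pour
def pourB (src : Int) (cap : Int) (dst : Int) : Int × Int :=
  let t := src + dst
  if t ≤ cap then (0, t) else (t - cap, cap)

-- Source B's full_round: one complete round of pours 1->2, 2->3, 3->1
def fullRound (c1 : Int) (c2 : Int) (c3 : Int) (s : Int × Int × Int) : Int × Int × Int :=
  let (a, b, c) := s
  let (a, b) := pourB a c2 b
  let (b, c) := pourB b c3 c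
  let (c, a) := pourB c c1 a
  (a, b, c)

-- Source B's "for _ in range(n): state = full_round(state)" jump loop
def iterRounds (c1 : Int) (c2 : Int) (c3 : Int) : Nat → (Int × Int × Int) → Int × Int × Int
  | 0, s => s
  | n + 1, s => iterRounds c1 c2 c3 n (fullRound c1 c2 c3 s)

-- Source B's "while r < 33" loop; fuel = 33 - r mirrors the loop guard.
-- Python's "state in history" + "history.index(state)" is the single first-match
-- lookup PySem.List.index?; Python's (33 - r) % (r - i) is on nonnegative ints
-- with positive divisor (i < r ≤ 33), so Nat subtraction/mod are exact here.
def bLoop (c1 : Int) (c2 : Int) (c3 : Int) :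
    Nat → Nat → List (Int × Int × Int) → (Int × Int × Int) → Int × Int × Int
  | 0, _, _, state => state
  | fuel + 1, r, history, state =>
    match PySem.List.index? history state with
    | some i => iterRounds c1 c2 c3 ((33 - r) % (r - i)) state
    | none => bLoop c1 c2 c3 fuel (r + 1) (history ++ [state]) (fullRound c1 c2 c3 state)

def mix_milk_alt (c1 : Int) (m1 : Int) (c2 : Int) (m2 : Int) (c3 : Int) (m3 : Int) : Int × Int × Int :=
  let s := bLoop c1 c2 c3 33 0 [] (m1, m2, m3)
  let (a, b) := pourB s.1 c2 s.2.1
  (a, b, s.2.2)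

-- ===== PRECONDITION & SPEC =====
def Spec_mix_milk (c1 : Int) (m1 : Int) (c2 : Int) (m2 : Int) (c3 : Int) (m3 : Int) (out : Int × Int × Int) : Prop := out = mix_milk_alt c1 m1 c2 m2 c3 m3
instance (c1 : Int) (m1 : Int) (c2 : Int) (m2 : Int) (c3 : Int) (m3 : Int) (out : Int × Int × Int) : Decidable (Spec_mix_milk c1 m1 c2 m2 c3 m3 out) := by unfold Spec_mix_milk; infer_instance

-- ===== CLAIM (what is proved, stated in full; the proofs are below) =====
def Claim_equal_mix_milk : Prop := ∀ (c1 : Int) (m1 : Int) (c2 : Int) (m2 : Int) (c3 : Int) (m3 : Int), Dom_mix_milk c1 m1 c2 m2 c3 m3 → Spec_mix_milk c1 m1 c2 m2 c3 m3 (mix_milk c1 m1 c2 m2 c3 m3)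

-- ===== LEMMAS AND PROOFS =====

/-- `n` applications of A's loop body (proof-side iterate of `mixStepA`). -/
def gIter (c1 c2 c3 : Int) : Nat → (Int × Int × Int × Int) → Int × Int × Int × Int
  | 0, st => st
  | n + 1, st => gIter c1 c2 c3 n (mixStepA c1 c2 c3 st)

lemma pourB_eq (src cap dst : Int) : pourB src cap dst = pour_milk src cap dst := by
  simp [pourB, pour_milk]

lemma foldl_const (c1 c2 c3 : Int) (l : List Int) (st : Int × Int × Int × Int) :
    l.foldl (fun s _ => mixStepA c1 c2 c3 s) st = gIter c1 c2 c3 l.length st := by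
  induction l generalizing st with
  | nil => rfl
  | cons x xs ih => simp [List.foldl_cons, ih, gIter]

lemma gIter_add (c1 c2 c3 : Int) (a b : Nat) (st : Int × Int × Int × Int) :
    gIter c1 c2 c3 (a + b) st = gIter c1 c2 c3 b (gIter c1 c2 c3 a st) := by
  induction a generalizing st with
  | zero => simp [gIter]
  | succ n ih =>
    have h : n + 1 + b = (n + b) + 1 := by omega
    rw [h]
    show gIter c1 c2 c3 (n + b) (mixStepA c1 c2 c3 st) = _
    rw [ih]
    rfl

lemma iterRounds_add (c1 c2 c3 : Int) (a b : Nat) (s : Int × Int × Int) :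
    iterRounds c1 c2 c3 (a + b) s = iterRounds c1 c2 c3 b (iterRounds c1 c2 c3 a s) := by
  induction a generalizing s with
  | zero => simp [iterRounds]
  | succ n ih =>
    have h : n + 1 + b = (n + b) + 1 := by omega
    rw [h]
    show iterRounds c1 c2 c3 (n + b) (fullRound c1 c2 c3 s) = _
    rw [ih]
    rfl

lemma iterRounds_succ' (c1 c2 c3 : Int) (n : Nat) (s : Int × Int × Int) :
    iterRounds c1 c2 c3 (n + 1) s = fullRound c1 c2 c3 (iterRounds c1 c2 c3 n s) := by
  have := iterRounds_add c1 c2 c3 n 1 s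
  simpa [iterRounds] using this

lemma stepA1 (c1 c2 c3 a b c : Int) :
    mixStepA c1 c2 c3 (1, a, b, c) = (2, (pour_milk a c2 b).1, (pour_milk a c2 b).2, c) := by
  rcases h : pour_milk a c2 b with ⟨x, y⟩
  simp [mixStepA, h]

lemma stepA2 (c1 c2 c3 a b c : Int) :
    mixStepA c1 c2 c3 (2, a, b, c) = (3, a, (pour_milk b c3 c).1, (pour_milk b c3 c).2) := by
  rcases h : pour_milk b c3 c with ⟨x, y⟩
  simp [mixStepA, h]

lemma stepA3 (c1 c2 c3 a b c : Int) :
    mixStepA c1 c2 c3 (3, a, b, c) = (4, (pour_milk c c1 a).2, b, (pour_milk c c1 a).1) := by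
  rcases h : pour_milk c c1 a with ⟨x, y⟩
  simp [mixStepA, h]

lemma stepA4 (c1 c2 c3 : Int) (s : Int × Int × Int) :
    mixStepA c1 c2 c3 (4, s) = mixStepA c1 c2 c3 (1, s) := by
  rcases s with ⟨a, b, c⟩
  simp [mixStepA]

lemma g3 (c1 c2 c3 : Int) (s : Int × Int × Int) :
    gIter c1 c2 c3 3 (1, s) = (4, fullRound c1 c2 c3 s) := by
  rcases s with ⟨a, b, c⟩
  rcases h1 : pour_milk a c2 b with ⟨a1, b1⟩
  rcases h2 : pour_milk b1 c3 c with ⟨b2, c2'⟩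
  rcases h3 : pour_milk c2' c1 a1 with ⟨c3', a2⟩
  simp [gIter, stepA1, stepA2, stepA3, h1, h2, h3, fullRound, pourB_eq]

lemma gIter_4_eq_1 (c1 c2 c3 : Int) (n : Nat) (s : Int × Int × Int) :
    gIter c1 c2 c3 (n + 1) (4, s) = gIter c1 c2 c3 (n + 1) (1, s) := by
  simp [gIter, stepA4]

lemma gIter_3k (c1 c2 c3 : Int) :
    ∀ (k : Nat) (s : Int × Int × Int),
      gIter c1 c2 c3 (3 * (k + 1)) (1, s) = (4, iterRounds c1 c2 c3 (k + 1) s) := by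
  intro k
  induction k with
  | zero => intro s; simpa [iterRounds] using g3 c1 c2 c3 s
  | succ k ih =>
    intro s
    have h33 : 3 * (k + 2) = 3 + 3 * (k + 1) := by ring
    rw [h33, gIter_add, g3]
    have h1 : 3 * (k + 1) = 3 * k + 2 + 1 := by ring
    rw [h1, gIter_4_eq_1, ← h1, ih]
    rfl

/-- A computes: 33 full rounds then one 1->2 pour. -/
lemma A_closed (c1 m1 c2 m2 c3 m3 : Int) :
    mix_milk c1 m1 c2 m2 c3 m3 =
      (let t := iterRounds c1 c2 c3 33 (m1, m2, m3)
       ((pour_milk t.1 c2 t.2.1).1, (pour_milk t.1 c2 t.2.1).2, t.2.2)) := by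
  have hlen : (PySem.List.pyRange 0 100 1).length = 100 := by decide
  have h99 : gIter c1 c2 c3 99 (1, (m1, m2, m3)) = (4, iterRounds c1 c2 c3 33 (m1, m2, m3)) := by
    have := gIter_3k c1 c2 c3 32 (m1, m2, m3)
    norm_num at this ⊢
    exact this
  have h100 : gIter c1 c2 c3 100 (1, (m1, m2, m3))
      = mixStepA c1 c2 c3 (4, iterRounds c1 c2 c3 33 (m1, m2, m3)) := by
    have := gIter_add c1 c2 c3 99 1 (1, (m1, m2, m3))
    norm_num at this
    rw [this, h99]; rfl
  rcases ht : iterRounds c1 c2 c3 33 (m1, m2, m3) with ⟨a, b, c⟩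
  simp only [mix_milk, foldl_const, hlen, h100, ht, stepA4, stepA1]

/-- shift periodicity: a repeat at i / i+p propagates to all later indices. -/
lemma per_shift (c1 c2 c3 : Int) (s0 : Int × Int × Int) (i p : Nat)
    (h : iterRounds c1 c2 c3 i s0 = iterRounds c1 c2 c3 (i + p) s0) :
    ∀ k, iterRounds c1 c2 c3 (i + k) s0 = iterRounds c1 c2 c3 (i + k + p) s0 := by
  intro k
  have h1 : i + k + p = (i + p) + k := by omega
  rw [iterRounds_add c1 c2 c3 i k, h1, iterRounds_add c1 c2 c3 (i + p) k, ← h]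

lemma per_mul (c1 c2 c3 : Int) (s0 : Int × Int × Int) (i p : Nat)
    (h : iterRounds c1 c2 c3 i s0 = iterRounds c1 c2 c3 (i + p) s0) :
    ∀ (q n : Nat), i ≤ n → iterRounds c1 c2 c3 (n + p * q) s0 = iterRounds c1 c2 c3 n s0 := by
  intro q
  induction q with
  | zero => intro n _; simp
  | succ q ih =>
    intro n hn
    have h1 : n + p * (q + 1) = (n + p) + p * q := by ring
    rw [h1, ih (n + p) (by omega)]
    have := per_shift c1 c2 c3 s0 i p h (n - i)
    have h2 : i + (n - i) = n := by omega
    rw [h2] at this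
    exact this.symm

lemma bLoop_correct (c1 c2 c3 : Int) (s0 : Int × Int × Int) :
    ∀ (fuel r : Nat) (history : List (Int × Int × Int)) (state : Int × Int × Int),
      fuel + r = 33 →
      history = (List.range r).map (fun j => iterRounds c1 c2 c3 j s0) →
      state = iterRounds c1 c2 c3 r s0 →
      bLoop c1 c2 c3 fuel r history state = iterRounds c1 c2 c3 33 s0 := by
  intro fuel
  induction fuel with
  | zero =>
    intro r history state hfr _ hs
    have : r = 33 := by omega
    subst this; simpa [bLoop] using hs
  | succ fuel ih =>
    intro r history state hfr hh hs
    rw [bLoop]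
    cases hidx : PySem.List.index? history state with
    | none =>
      apply ih (r + 1) _ _ (by omega)
      · rw [hh, hs, List.range_succ, List.map_append]; rfl
      · rw [hs, ← iterRounds_succ']
    | some i =>
      subst hh hs
      obtain ⟨hk, hget, -⟩ := PySem.List.getElem_of_index?_eq_some hidx
      have hir : i < r := by simpa using hk
      -- periodicity: iter i = iter r, period p = r - i > 0
      have hper : iterRounds c1 c2 c3 i s0 = iterRounds c1 c2 c3 (i + (r - i)) s0 := by
        have h2 : i + (r - i) = r := by omega
        rw [h2]
        simpa using hget
      have hdm := Nat.div_add_mod (33 - r) (r - i)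
      have h33 : (r + (33 - r) % (r - i)) + (r - i) * ((33 - r) / (r - i)) = 33 := by omega
      show iterRounds c1 c2 c3 ((33 - r) % (r - i)) (iterRounds c1 c2 c3 r s0)
            = iterRounds c1 c2 c3 33 s0
      rw [← iterRounds_add]
      calc iterRounds c1 c2 c3 (r + (33 - r) % (r - i)) s0
          = iterRounds c1 c2 c3 ((r + (33 - r) % (r - i)) + (r - i) * ((33 - r) / (r - i))) s0 :=
            (per_mul c1 c2 c3 s0 i (r - i) hper ((33 - r) / (r - i))
              (r + (33 - r) % (r - i)) (by omega)).symm
        _ = iterRounds c1 c2 c3 33 s0 := by rw [h33]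

lemma mix_milk_eq (c1 m1 c2 m2 c3 m3 : Int) :
    mix_milk c1 m1 c2 m2 c3 m3 = mix_milk_alt c1 m1 c2 m2 c3 m3 := by
  have hB : bLoop c1 c2 c3 33 0 [] (m1, m2, m3) = iterRounds c1 c2 c3 33 (m1, m2, m3) :=
    bLoop_correct c1 c2 c3 (m1, m2, m3) 33 0 [] (m1, m2, m3) rfl (by simp) rfl
  rw [A_closed]
  rcases ht : iterRounds c1 c2 c3 33 (m1, m2, m3) with ⟨a, b, c⟩
  rcases h1 : pour_milk a c2 b with ⟨x, y⟩
  simp [mix_milk_alt, hB, ht, pourB_eq, h1]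

-- ===== VERDICT (by name: the statement is the Claim_ definition above) =====
theorem mix_milk_spec : Claim_equal_mix_milk := by
  intro c1 m1 c2 m2 c3 m3 _
  exact mix_milk_eq c1 m1 c2 m2 c3 m3
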